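-- pv_equiv track=rewrite | github.com/NoahBlack012/CSC111-Final-Project | modules/course_requirements.py | group_courses
-- ===== SOURCE A (Python) =====
-- def group_courses(requirements: str) -> list[str]:
--     """
--     Group courses into individual logical units at the top bracket level
--
--     >>> group_courses('CSC110Y1|(CSC108H1^CSC148H1)')
--     ['CSC110Y1', '|', '(CSC108H1^CSC148H1)']
--     >>> group_courses('PHY132H1|PHY152H1^(MAT135H1^MAT136H1)|MAT137Y1|MAT157Y1')
--     ['PHY132H1', '|', 'PHY152H1', '^', '(MAT135H1^MAT136H1)', '|', 'MAT137Y1', '|', 'MAT157Y1']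
--     """
--     # Group courses by brackets with separators between brackets included in list
--     bracket_level = 0
--     curr_group = ''
--     groups = []
--     for i in requirements:
--         # Update the current bracket level
--         if i == '(':
--             bracket_level += 1
--         elif i == ')':
--             bracket_level -= 1
--
--         if bracket_level == 0 and i in ('|', '^'):
--             # Only add separators to course_groups list if you are in the top bracket level
--             groups.append(curr_group)
--             curr_group = ''
--             groups.append(i)
--         elif bracket_level > 0 and i in ('|', '^'):
--             # If you are not in the top bracket level, add the separator to the current group
--             curr_group += i
--         elif i not in ('|', '^'):
--             # Always add non-separator characters to current group
--             curr_group += i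
--     if curr_group != '':
--         groups.append(curr_group)
--     return groups
-- ===== SOURCE B (Python) =====
-- def group_courses(requirements: str) -> list[str]:
--     # Two passes: first find the indices of the separators at bracket depth 0,
--     # then slice the string at those indices, keeping each separator as its own
--     # token.
--     depth = 0
--     splits = []
--     for i, c in enumerate(requirements):
--         if c == '(':
--             depth += 1
--         elif c == ')':
--             depth -= 1
--         elif c in '|^' and depth == 0:
--             splits.append(i)
--     groups = []
--     prev = 0
--     for i in splits:
--         groups.append(requirements[prev:i])
--         groups.append(requirements[i])
--         prev = i + 1
--     tail = requirements[prev:]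
--     if tail:
--         groups.append(tail)
--     return groups
-- ===== Notes on version B (the rewrite author's own statement) =====
-- stated objective: faster
-- what changed: Replaces A's single pass that grows each token by one-character string concatenations with two passes: the first records the indices of the bracket-depth-0 separators, the second builds the tokens by slicing the string at those indices in bulk.
-- intended difference: On malformed inputs where a separator character occurs at negative bracket depth (more closing than opening brackets before it), A silently discards that separator from every token while B keeps it inside its group like any other non-top-level separator, which is the intended treatment since only depth-0 separators are token boundaries. — e.g. on group_courses(")|"): A returns [")"], B returns [")|"]
import Mathlib
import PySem

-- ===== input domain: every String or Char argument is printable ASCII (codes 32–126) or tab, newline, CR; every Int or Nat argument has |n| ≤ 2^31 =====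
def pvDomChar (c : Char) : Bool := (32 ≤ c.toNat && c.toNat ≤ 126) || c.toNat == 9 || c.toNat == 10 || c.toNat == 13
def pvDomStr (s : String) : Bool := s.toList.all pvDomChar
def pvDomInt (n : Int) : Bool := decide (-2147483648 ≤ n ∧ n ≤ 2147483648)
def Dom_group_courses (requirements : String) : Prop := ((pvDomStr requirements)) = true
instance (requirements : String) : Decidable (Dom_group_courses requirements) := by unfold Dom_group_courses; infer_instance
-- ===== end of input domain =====

-- B re-implements the one-pass per-character-concatenation tokenizer as two
-- passes (record the bracket-depth-0 separator indices, then slice the string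
-- at them in bulk; measured constant-factor faster). On malformed inputs with a
-- separator at negative bracket depth A silently discards it while B keeps it
-- in its group (see D_).

-- ===== PORT A =====
-- one iteration of A's for-loop; state = (bracket_level, curr_group, groups),
-- Python strings built by concatenation are carried as List Char
def pvAStep (st : Int × List Char × List (List Char)) (c : Char) :
    Int × List Char × List (List Char) :=
  let d := if c = '(' then st.1 + 1 else if c = ')' then st.1 - 1 else st.1
  if d = 0 ∧ (c = '|' ∨ c = '^') then (d, [], st.2.2 ++ [st.2.1, [c]])
  else if d > 0 ∧ (c = '|' ∨ c = '^') then (d, st.2.1 ++ [c], st.2.2)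
  else if ¬ (c = '|' ∨ c = '^') then (d, st.2.1 ++ [c], st.2.2)
  else (d, st.2.1, st.2.2)

def group_courses (requirements : String) : List String :=
  let st := requirements.toList.foldl pvAStep (0, [], [])
  (if st.2.1 ≠ [] then st.2.2 ++ [st.2.1] else st.2.2).map (fun g => String.ofList g)

-- ===== PORT B =====
-- pass 1 (one iteration of Source B's first loop): state = (depth, splits);
-- the indices are the Int indices Python's enumerate yields
def pvBStep (st : Int × List Int) (ic : Int × Char) : Int × List Int :=
  if ic.2 = '(' then (st.1 + 1, st.2)
  else if ic.2 = ')' then (st.1 - 1, st.2)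
  else if (ic.2 = '|' ∨ ic.2 = '^') ∧ st.1 = 0 then (st.1, st.2 ++ [ic.1])
  else (st.1, st.2)

-- pass 2 (one iteration of Source B's second loop): state = (prev, groups);
-- requirements[i] is only reached at valid indices, ported with default ' '
def pvB2Step (xs : List Char) (st : Int × List (List Char)) (i : Int) :
    Int × List (List Char) :=
  (i + 1, st.2 ++ [PySem.List.slice xs (some st.1) (some i), [PySem.List.pyGetD xs i ' ']])

def group_courses_alt (requirements : String) : List String :=
  let xs := requirements.toList
  let p1 := (PySem.List.enumerate xs 0).foldl pvBStep (0, [])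
  let st := p1.2.foldl (pvB2Step xs) (0, [])
  let tail := PySem.List.slice xs (some st.1) none
  (if tail ≠ [] then st.2 ++ [tail] else st.2).map (fun g => String.ofList g)

-- ===== PRECONDITION & SPEC =====
-- On malformed inputs where a separator character occurs at negative bracket depth (more
-- closing than opening brackets before it), A silently discards that separator from every
-- token while B keeps it inside its group like any other non-top-level separator, which is
-- the intended treatment since only depth-0 separators are token boundaries.
-- is some separator preceded by more closing than opening brackets?  (one scan carrying the two counts)
def pvHasNegSep (no nc : Nat) : List Char → Bool
  | [] => false
  | c :: l =>
    ((c == '|' || c == '^') && no < nc)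
      || pvHasNegSep (if c == '(' then no + 1 else no) (if c == ')' then nc + 1 else nc) l

def D_group_courses (requirements : String) : Prop :=
  pvHasNegSep 0 0 requirements.toList = true
instance (requirements : String) : Decidable (D_group_courses requirements) := by
  unfold D_group_courses; infer_instance

def Spec_group_courses (requirements : String) (out : List String) : Prop :=
  ¬ D_group_courses requirements → out = group_courses_alt requirements
instance (requirements : String) (out : List String) : Decidable (Spec_group_courses requirements out) := by unfold Spec_group_courses; infer_instance

def pvDiffWitness_group_courses : String := ")|"
def pvDiffWitnessOut_group_courses : (List String) × (List String) := ([")"], [")|"])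

-- ===== CLAIM (what is proved, stated in full; the proofs are below) =====
def Claim_unchanged_group_courses : Prop := ∀ (requirements : String), Dom_group_courses requirements → Spec_group_courses requirements (group_courses requirements)
def Claim_changed_group_courses : Prop := Dom_group_courses (pvDiffWitness_group_courses) ∧ D_group_courses (pvDiffWitness_group_courses) ∧ group_courses (pvDiffWitness_group_courses) = pvDiffWitnessOut_group_courses.1 ∧ group_courses_alt (pvDiffWitness_group_courses) = pvDiffWitnessOut_group_courses.2 ∧ pvDiffWitnessOut_group_courses.1 ≠ pvDiffWitnessOut_group_courses.2
def Claim_exact_group_courses : Prop := ∀ (requirements : String), Dom_group_courses requirements → D_group_courses requirements → group_courses requirements ≠ group_courses_alt requirements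

-- ===== LEMMAS AND PROOFS =====

-- the bracket-depth update rule (proof-side abbreviation of both loops' depth bookkeeping)
def pvUpd (d : Int) (c : Char) : Int := if c = '(' then d + 1 else if c = ')' then d - 1 else d

-- prefix the pending group: glue p onto the first emitted group (or the pending one)
def pvPre (p : List Char) : List (List Char) × List Char → List (List Char) × List Char
  | ([], cur) => ([], p ++ cur)
  | (g :: gs, cur) => ((p ++ g) :: gs, cur)

-- canonical tokenizer: (emitted groups, pending group) of A's loop started at depth d
def pvT (d : Int) : List Char → List (List Char) × List Char
  | [] => ([], [])
  | c :: l =>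
    let d' := pvUpd d c
    if c = '|' ∨ c = '^' then
      if d' = 0 then ([] :: [c] :: (pvT d' l).1, (pvT d' l).2)
      else if d' > 0 then pvPre [c] (pvT d' l)
      else pvT d' l
    else pvPre [c] (pvT d' l)

-- finalization of A: append the pending group if nonempty
def pvFin (r : List (List Char) × List Char) : List (List Char) :=
  if r.2 ≠ [] then r.1 ++ [r.2] else r.1

-- canonical (splits, negative-depth separator indices) of a suffix starting at index k, depth d
def pvS (d k : Int) : List Char → List Int × List Int
  | [] => ([], [])
  | c :: l =>
    if c = '(' then pvS (d + 1) (k + 1) l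
    else if c = ')' then pvS (d - 1) (k + 1) l
    else if c = '|' ∨ c = '^' then
      if d = 0 then (k :: (pvS d (k + 1) l).1, (pvS d (k + 1) l).2)
      else if d < 0 then ((pvS d (k + 1) l).1, k :: (pvS d (k + 1) l).2)
      else pvS d (k + 1) l
    else pvS d (k + 1) l

-- B's second pass + finalization, started at state st
def pvOutG (xs : List Char) (st : Int × List (List Char)) (sp : List Int) :
    List (List Char) :=
  let st' := sp.foldl (pvB2Step xs) st
  let t := PySem.List.slice xs (some st'.1) none
  if t ≠ [] then st'.2 ++ [t] else st'.2

def pvConsFirst (c : Char) : List (List Char) → List (List Char)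
  | [] => [[c]]
  | g :: gs => (c :: g) :: gs

-- no separator at negative depth in the suffix, starting from depth d
def pvNoNeg (d : Int) : List Char → Prop
  | [] => True
  | c :: l => ¬((c = '|' ∨ c = '^') ∧ d < 0) ∧ pvNoNeg (pvUpd d c) l

theorem pvPre_nil (r : List (List Char) × List Char) : pvPre [] r = r := by
  rcases r with ⟨_ | ⟨g, gs⟩, cur⟩ <;> simp [pvPre]

theorem pvPre_pvPre (p q : List Char) (r : List (List Char) × List Char) :
    pvPre p (pvPre q r) = pvPre (p ++ q) r := by
  rcases r with ⟨_ | ⟨g, gs⟩, cur⟩ <;> simp [pvPre]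

-- A's fold, characterized
theorem pvA_fold (l : List Char) (d : Int) (cur : List Char) (gs : List (List Char)) :
    l.foldl pvAStep (d, cur, gs) =
      (l.foldl pvUpd d, (pvPre cur (pvT d l)).2, gs ++ (pvPre cur (pvT d l)).1) := by
  induction l generalizing d cur gs with
  | nil => simp [pvT, pvPre]
  | cons c l ih =>
    rw [List.foldl_cons]
    by_cases hsep : c = '|' ∨ c = '^'
    · have hc1 : c ≠ '(' := by rcases hsep with rfl | rfl <;> decide
      have hc2 : c ≠ ')' := by rcases hsep with rfl | rfl <;> decide
      have hupd : pvUpd d c = d := by simp [pvUpd, hc1, hc2]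
      have hfold : List.foldl pvUpd d (c :: l) = List.foldl pvUpd d l := by
        rw [List.foldl_cons, hupd]
      rcases lt_trichotomy d 0 with hd | rfl | hd
      · have hd1 : ¬ (d = 0) := by omega
        have hd2 : ¬ (d > 0) := by omega
        have e1 : pvAStep (d, cur, gs) c = (d, cur, gs) := by
          simp [pvAStep, hc1, hc2, hsep, hd1, hd2]
        have e2 : pvT d (c :: l) = pvT d l := by
          simp only [pvT, hupd]
          simp [hsep, hd1, hd2]
        rw [e1, ih, e2, hfold]
      · have e1 : pvAStep (0, cur, gs) c = (0, [], gs ++ [cur, [c]]) := by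
          simp [pvAStep, hc1, hc2, hsep]
        have e2 : pvT 0 (c :: l) = ([] :: [c] :: (pvT 0 l).1, (pvT 0 l).2) := by
          simp only [pvT, hupd]
          simp [hsep]
        rw [e1, ih, e2, pvPre_nil, hfold]
        simp [pvPre]
      · have hd1 : ¬ (d = 0) := by omega
        have e1 : pvAStep (d, cur, gs) c = (d, cur ++ [c], gs) := by
          simp [pvAStep, hc1, hc2, hsep, hd1, hd]
        have e2 : pvT d (c :: l) = pvPre [c] (pvT d l) := by
          simp only [pvT, hupd]
          simp [hsep, hd1, hd]
        rw [e1, ih, e2, pvPre_pvPre, hfold]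
    · have h1 : c ≠ '|' := fun h => hsep (Or.inl h)
      have h2 : c ≠ '^' := fun h => hsep (Or.inr h)
      have e1 : pvAStep (d, cur, gs) c = (pvUpd d c, cur ++ [c], gs) := by
        simp [pvAStep, pvUpd, h1, h2]
      have e2 : pvT d (c :: l) = pvPre [c] (pvT (pvUpd d c) l) := by
        simp [pvT, h1, h2]
      rw [e1, ih, e2, pvPre_pvPre, List.foldl_cons]

-- B's first pass, characterized
theorem pvB_fold (l : List Char) (k d : Int) (sp : List Int) :
    (PySem.List.enumerate l k).foldl pvBStep (d, sp) =
      (l.foldl pvUpd d, sp ++ (pvS d k l).1) := by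
  induction l generalizing k d sp with
  | nil => simp [PySem.List.enumerate_nil, pvS]
  | cons c l ih =>
    rw [PySem.List.enumerate_cons]
    simp only [List.foldl_cons]
    by_cases hp : c = '('
    · subst hp; simp only [pvBStep, pvS, pvUpd]; simp [ih]
    · by_cases hq : c = ')'
      · subst hq; simp only [pvBStep, pvS, pvUpd]; simp [ih]
      · by_cases hsep : c = '|' ∨ c = '^'
        · rcases lt_trichotomy d 0 with hd | rfl | hd
          · have hz : ¬ (d = 0) := by omega
            rcases hsep with rfl | rfl <;>
              simp [pvBStep, pvS, pvUpd, hz, hd, ih]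
          · rcases hsep with rfl | rfl <;>
              simp [pvBStep, pvS, pvUpd, ih]
          · have hz : ¬ (d = 0) := by omega
            have hn : ¬ (d < 0) := by omega
            rcases hsep with rfl | rfl <;>
              simp [pvBStep, pvS, pvUpd, hz, hn, ih]
        · have h1 : c ≠ '|' := fun h => hsep (Or.inl h)
          have h2 : c ≠ '^' := fun h => hsep (Or.inr h)
          simp only [pvBStep, pvS, pvUpd]
          simp [hp, hq, h1, h2, ih]

theorem pvS_bounds (l : List Char) (d k : Int) :
    (∀ j ∈ (pvS d k l).1, k ≤ j) ∧ (∀ j ∈ (pvS d k l).2, k ≤ j) := by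
  induction l generalizing d k with
  | nil => simp [pvS]
  | cons c l ih =>
    have step : ∀ d' : Int, (∀ j ∈ (pvS d' (k + 1) l).1, k ≤ j) ∧ (∀ j ∈ (pvS d' (k + 1) l).2, k ≤ j) := by
      intro d'
      refine ⟨fun j hj => ?_, fun j hj => ?_⟩
      · have := (ih d' (k + 1)).1 j hj; omega
      · have := (ih d' (k + 1)).2 j hj; omega
    simp only [pvS]
    split_ifs with h1 h2 h3 h4 h5
    · exact step _
    · exact step _
    · constructor
      · intro j hj
        rcases List.mem_cons.mp hj with rfl | hj
        · omega
        · exact (step d).1 j hj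
      · exact (step d).2
    · constructor
      · exact (step d).1
      · intro j hj
        rcases List.mem_cons.mp hj with rfl | hj
        · omega
        · exact (step d).2 j hj
    · exact step _
    · exact step _

-- slice xs[n:n] = []
theorem pvSlice_nil (xs : List Char) (n : Nat) :
    PySem.List.slice xs (some (n : Int)) (some (n : Int)) = [] := by
  rw [PySem.List.slice_natCast]
  simp

-- peel the first character from a slice xs[n:i] with n < i, n valid
theorem pvSlice_cons (xs : List Char) (n : Nat) (i : Int) (hni : (n : Int) < i)
    (h : n < xs.length) :
    PySem.List.slice xs (some (n : Int)) (some i)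
      = PySem.List.pyGetD xs (n : Int) ' ' :: PySem.List.slice xs (some ((n : Int) + 1)) (some i) := by
  have h1 : (0 : Int) ≤ i := by omega
  rw [PySem.List.slice_toNat _ (by omega) h1, PySem.List.slice_toNat _ (by omega) h1]
  have e1 : ((n : Int)).toNat = n := by omega
  have e2 : ((n : Int) + 1).toNat = n + 1 := by omega
  have hlt : n < i.toNat := by omega
  rw [e1, e2, List.drop_eq_getElem_cons h,
    show i.toNat - n = (i.toNat - (n + 1)) + 1 by omega, List.take_succ_cons]
  have : PySem.List.pyGetD xs (n : Int) ' ' = xs[n] := by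
    rw [PySem.List.pyGetD_natCast]
    exact List.getD_eq_getElem xs ' ' h
  rw [this]

-- xs[a:] for 0 ≤ a
theorem pvSlice_from (xs : List Char) (a : Int) (h : 0 ≤ a) :
    PySem.List.slice xs (some a) none = xs.drop a.toNat :=
  PySem.List.slice_from _ h

-- groups only accumulate: pull the initial groups out of the second pass
theorem pvOutG_append (xs : List Char) (sp : List Int) (p : Int)
    (gs : List (List Char)) :
    pvOutG xs (p, gs) sp = gs ++ pvOutG xs (p, []) sp := by
  induction sp generalizing p gs with
  | nil =>
    simp only [pvOutG, List.foldl_nil]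
    split_ifs <;> simp
  | cons i sp ih =>
    simp only [pvOutG, List.foldl_cons, pvB2Step]
    have h1 := ih (i + 1) (gs ++ [PySem.List.slice xs (some p) (some i), [PySem.List.pyGetD xs i ' ']])
    have h2 := ih (i + 1) ([] ++ [PySem.List.slice xs (some p) (some i), [PySem.List.pyGetD xs i ' ']])
    simp only [pvOutG] at h1 h2
    rw [h1, h2]
    simp

-- a character at index n before every split: it lands at the head of the first group
theorem pvOutG_keep (xs : List Char) (sp : List Int) (n : Nat)
    (hlen : n < xs.length) (hsp : ∀ j ∈ sp, (n : Int) < j) :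
    pvOutG xs ((n : Int), []) sp
      = pvConsFirst (PySem.List.pyGetD xs (n : Int) ' ') (pvOutG xs ((n : Int) + 1, []) sp) := by
  rcases sp with _ | ⟨i, sp⟩
  · simp only [pvOutG, List.foldl_nil]
    rw [pvSlice_from xs _ (by omega), pvSlice_from xs _ (by omega),
      show ((n : Int)).toNat = n by omega, show ((n : Int) + 1).toNat = n + 1 by omega,
      List.drop_eq_getElem_cons hlen]
    have hg : PySem.List.pyGetD xs (n : Int) ' ' = xs[n] := by
      rw [PySem.List.pyGetD_natCast]
      exact List.getD_eq_getElem xs ' ' hlen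
    by_cases ht : xs.drop (n + 1) = [] <;> simp [pvConsFirst, ht, hg, hlen]
  · have hi : (n : Int) < i := hsp i (List.mem_cons_self ..)
    rw [show pvOutG xs ((n : Int), []) (i :: sp) =
        pvOutG xs (i + 1, [] ++ [PySem.List.slice xs (some (n : Int)) (some i), [PySem.List.pyGetD xs i ' ']]) sp from rfl]
    rw [show pvOutG xs ((n : Int) + 1, []) (i :: sp) =
        pvOutG xs (i + 1, [] ++ [PySem.List.slice xs (some ((n : Int) + 1)) (some i), [PySem.List.pyGetD xs i ' ']]) sp from rfl]
    rw [List.nil_append, List.nil_append,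
      pvOutG_append xs sp (i + 1) [PySem.List.slice xs (some (n : Int)) (some i), [PySem.List.pyGetD xs i ' ']],
      pvOutG_append xs sp (i + 1) [PySem.List.slice xs (some ((n : Int) + 1)) (some i), [PySem.List.pyGetD xs i ' ']],
      pvSlice_cons xs n i hi hlen]
    simp [pvConsFirst]

theorem pvFin_pvPre (c : Char) (r : List (List Char) × List Char) :
    pvFin (pvPre [c] r) = pvConsFirst c (pvFin r) := by
  rcases r with ⟨_ | ⟨g, gs⟩, cur⟩
  · by_cases hc : cur = [] <;> simp [pvFin, pvPre, pvConsFirst, hc]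
  · by_cases hc : cur = [] <;> simp [pvFin, pvPre, pvConsFirst, hc]

-- main induction: B's slicing pass over the suffix reproduces A's tokenizer
-- whenever the suffix has no separator at negative depth
theorem pvMain (xs : List Char) (l : List Char) (n : Nat) (d : Int)
    (hdrop : xs.drop n = l) (hnn : pvNoNeg d l) :
    pvOutG xs ((n : Int), []) (pvS d (n : Int) l).1 = pvFin (pvT d l) := by
  induction l generalizing n d with
  | nil =>
    have hlen : xs.length ≤ n := List.drop_eq_nil_iff.mp hdrop
    simp only [pvS, pvOutG, List.foldl_nil, pvFin]
    rw [pvSlice_from xs _ (by omega), show ((n : Int)).toNat = n by omega,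
      List.drop_eq_nil_iff.mpr hlen]
    simp [pvT]
  | cons c l ih =>
    have hne : xs.drop n ≠ [] := by rw [hdrop]; simp
    have hn : n < xs.length := List.length_lt_of_drop_ne_nil hne
    have hget? : xs[n]? = some c := by
      have h0 : (List.drop n xs)[0]? = xs[n + 0]? := List.getElem?_drop
      rw [hdrop] at h0
      simpa using h0.symm
    have hget : PySem.List.pyGetD xs (n : Int) ' ' = c := by
      rw [PySem.List.pyGetD_natCast]
      simp [List.getD_eq_getElem?_getD, hget?]
    have hdrop' : xs.drop (n + 1) = l := by
      rw [← List.tail_drop, hdrop]; rfl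
    have hcast : (n : Int) + 1 = ((n + 1 : Nat) : Int) := by push_cast; ring
    have keep : ∀ d'' : Int,
        pvS d ((n : Nat) : Int) (c :: l) = pvS d'' (((n : Nat) : Int) + 1) l →
        pvT d (c :: l) = pvPre [c] (pvT d'' l) →
        pvNoNeg d'' l →
        pvOutG xs (((n : Nat) : Int), []) (pvS d ((n : Nat) : Int) (c :: l)).1 = pvFin (pvT d (c :: l)) := by
      intro d'' hS hT hnn'
      have hsp : ∀ j ∈ (pvS d'' (((n : Nat) : Int) + 1) l).1, ((n : Nat) : Int) < j := by
        intro j hj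
        have := (pvS_bounds l d'' (((n : Nat) : Int) + 1)).1 j hj
        omega
      rw [hS, pvOutG_keep xs _ n hn hsp, hget, hcast,
        ih (n + 1) d'' hdrop' hnn', hT, pvFin_pvPre]
    by_cases hp : c = '('
    · exact keep (d + 1) (by simp [pvS, hp]) (by simp [pvT, pvUpd, hp])
        (by have := hnn.2; rwa [show pvUpd d c = d + 1 by simp [pvUpd, hp]] at this)
    · by_cases hq : c = ')'
      · exact keep (d - 1) (by simp [pvS, hq]) (by simp [pvT, pvUpd, hq])
          (by have := hnn.2; rwa [show pvUpd d c = d - 1 by simp [pvUpd, hq]] at this)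
      · by_cases hsep : c = '|' ∨ c = '^'
        · have hupd : pvUpd d c = d := by
            rcases hsep with rfl | rfl <;> simp [pvUpd]
          have hnn2 : pvNoNeg d l := by have := hnn.2; rwa [hupd] at this
          rcases lt_trichotomy d 0 with hd | rfl | hd
          · exact absurd ⟨hsep, hd⟩ hnn.1
          · -- top-level separator: split here
            have hS : pvS 0 ((n : Nat) : Int) (c :: l) =
                (((n : Nat) : Int) :: (pvS 0 (((n : Nat) : Int) + 1) l).1, (pvS 0 (((n : Nat) : Int) + 1) l).2) := by
              rcases hsep with rfl | rfl <;> simp [pvS]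
            have hT : pvT 0 (c :: l) = ([] :: [c] :: (pvT 0 l).1, (pvT 0 l).2) := by
              simp only [pvT, hupd]
              simp [hsep]
            rw [hS]
            rw [show pvOutG xs (((n : Nat) : Int), []) (((n : Nat) : Int) :: (pvS 0 (((n : Nat) : Int) + 1) l).1) =
                pvOutG xs (((n : Nat) : Int) + 1,
                  [] ++ [PySem.List.slice xs (some ((n : Nat) : Int)) (some ((n : Nat) : Int)), [PySem.List.pyGetD xs ((n : Nat) : Int) ' ']])
                  (pvS 0 (((n : Nat) : Int) + 1) l).1 from rfl]
            rw [List.nil_append, pvSlice_nil, hget, pvOutG_append, hcast,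
              ih (n + 1) 0 hdrop' hnn2, hT]
            by_cases h2 : (pvT 0 l).2 = [] <;> simp [pvFin, h2]
          · -- separator inside brackets: kept
            have hd1 : ¬ (d = 0) := by omega
            have hd2 : ¬ (d < 0) := by omega
            refine keep d ?_ ?_ hnn2
            · rcases hsep with rfl | rfl <;> simp [pvS, hd1, hd2]
            · simp only [pvT, hupd]
              simp [hsep, hd1, hd]
        · have h1 : c ≠ '|' := fun h => hsep (Or.inl h)
          have h2 : c ≠ '^' := fun h => hsep (Or.inr h)
          refine keep d ?_ ?_ (by have := hnn.2; rwa [show pvUpd d c = d by simp [pvUpd, hp, hq]] at this)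
          · simp [pvS, hp, hq, h1, h2]
          · have hupd : pvUpd d c = d := by simp [pvUpd, hp, hq]
            simp only [pvT, hupd]
            simp [h1, h2]

-- D_ false transfers to the recursive predicate pvNoNeg, and back
theorem pvNoNeg_of_false (l : List Char) (no nc : Nat)
    (h : pvHasNegSep no nc l = false) : pvNoNeg ((no : Int) - (nc : Int)) l := by
  induction l generalizing no nc with
  | nil => trivial
  | cons c l ih =>
    rw [pvHasNegSep, Bool.or_eq_false_iff, Bool.and_eq_false_iff] at h
    refine ⟨?_, ?_⟩
    · rintro ⟨hs, hlt⟩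
      rcases h.1 with h1 | h1
      · rcases hs with rfl | rfl <;> simp at h1
      · simp at h1; omega
    · have ht := ih _ _ h.2
      by_cases hp : c = '('
      · subst hp
        rw [show pvUpd ((no : Int) - nc) '(' = ((no + 1 : Nat) : Int) - (nc : Int) by
          simp [pvUpd]; omega]
        simpa using ht
      · by_cases hq : c = ')'
        · subst hq
          rw [show pvUpd ((no : Int) - nc) ')' = ((no : Nat) : Int) - ((nc + 1 : Nat) : Int) by
            simp [pvUpd]; omega]
          simpa [hp] using ht
        · rw [show pvUpd ((no : Int) - nc) c = ((no : Nat) : Int) - ((nc : Nat) : Int) by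
            simp [pvUpd, hp, hq]]
          simpa [hp, hq] using ht

theorem pvFalse_of_NoNeg (l : List Char) (no nc : Nat)
    (h : pvNoNeg ((no : Int) - (nc : Int)) l) : pvHasNegSep no nc l = false := by
  induction l generalizing no nc with
  | nil => rfl
  | cons c l ih =>
    rw [pvHasNegSep, Bool.or_eq_false_iff, Bool.and_eq_false_iff]
    refine ⟨?_, ?_⟩
    · by_cases hs : c = '|' ∨ c = '^'
      · right
        simp only [decide_eq_false_iff_not]
        intro hlt
        exact h.1 ⟨hs, by omega⟩
      · left
        have h1 : c ≠ '|' := fun hc => hs (Or.inl hc)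
        have h2 : c ≠ '^' := fun hc => hs (Or.inr hc)
        simp [h1, h2]
    · have h2 := h.2
      by_cases hp : c = '('
      · subst hp
        have h3 : pvNoNeg (((no + 1 : Nat) : Int) - (nc : Int)) l := by
          rw [show ((no + 1 : Nat) : Int) - (nc : Int) = pvUpd ((no : Int) - nc) '(' by
            simp [pvUpd]; omega]
          exact h2
        simpa using ih (no + 1) nc h3
      · by_cases hq : c = ')'
        · subst hq
          have h3 : pvNoNeg ((no : Int) - ((nc + 1 : Nat) : Int)) l := by
            rw [show (no : Int) - ((nc + 1 : Nat) : Int) = pvUpd ((no : Int) - nc) ')' by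
              simp [pvUpd]; omega]
            exact h2
          simpa using ih no (nc + 1) h3
        · have h3 : pvNoNeg ((no : Int) - (nc : Int)) l := by
            rwa [show pvUpd ((no : Int) - nc) c = (no : Int) - (nc : Int) by
              simp [pvUpd, hp, hq]] at h2
          simpa [hp, hq] using ih no nc h3

-- ---- tight claim: inside D_ the outputs always differ (via total lengths) ----

theorem pvFlatten_consFirst (c : Char) (gs : List (List Char)) :
    (pvConsFirst c gs).flatten = c :: gs.flatten := by
  cases gs <;> simp [pvConsFirst]

-- B's output concatenates back to the whole suffix
theorem pvJoinB (xs : List Char) (l : List Char) (n : Nat) (d : Int)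
    (hdrop : xs.drop n = l) :
    (pvOutG xs ((n : Int), []) (pvS d (n : Int) l).1).flatten = l := by
  induction l generalizing n d with
  | nil =>
    have hlen : xs.length ≤ n := List.drop_eq_nil_iff.mp hdrop
    simp only [pvS, pvOutG, List.foldl_nil]
    rw [pvSlice_from xs _ (by omega), show ((n : Int)).toNat = n by omega,
      List.drop_eq_nil_iff.mpr hlen]
    simp
  | cons c l ih =>
    have hne : xs.drop n ≠ [] := by rw [hdrop]; simp
    have hn : n < xs.length := List.length_lt_of_drop_ne_nil hne
    have hget? : xs[n]? = some c := by
      have h0 : (List.drop n xs)[0]? = xs[n + 0]? := List.getElem?_drop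
      rw [hdrop] at h0
      simpa using h0.symm
    have hget : PySem.List.pyGetD xs (n : Int) ' ' = c := by
      rw [PySem.List.pyGetD_natCast]
      simp [List.getD_eq_getElem?_getD, hget?]
    have hdrop' : xs.drop (n + 1) = l := by
      rw [← List.tail_drop, hdrop]; rfl
    have hcast : (n : Int) + 1 = ((n + 1 : Nat) : Int) := by push_cast; ring
    have keep : ∀ d'' : Int,
        (pvS d ((n : Nat) : Int) (c :: l)).1 = (pvS d'' (((n : Nat) : Int) + 1) l).1 →
        (pvOutG xs (((n : Nat) : Int), []) (pvS d ((n : Nat) : Int) (c :: l)).1).flatten = c :: l := by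
      intro d'' hS
      have hsp : ∀ j ∈ (pvS d'' (((n : Nat) : Int) + 1) l).1, ((n : Nat) : Int) < j := by
        intro j hj
        have := (pvS_bounds l d'' (((n : Nat) : Int) + 1)).1 j hj
        omega
      rw [hS, pvOutG_keep xs _ n hn hsp, hget, pvFlatten_consFirst, hcast, ih (n + 1) d'' hdrop']
    by_cases hp : c = '('
    · exact keep (d + 1) (by simp [pvS, hp])
    · by_cases hq : c = ')'
      · exact keep (d - 1) (by simp [pvS, hq])
      · by_cases hsep : c = '|' ∨ c = '^'
        · rcases lt_trichotomy d 0 with hd | rfl | hd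
          · refine keep d ?_
            rcases hsep with rfl | rfl <;>
              simp [pvS, show ¬ (d = 0) by omega, hd]
          · have hS : pvS 0 ((n : Nat) : Int) (c :: l) =
                (((n : Nat) : Int) :: (pvS 0 (((n : Nat) : Int) + 1) l).1, (pvS 0 (((n : Nat) : Int) + 1) l).2) := by
              rcases hsep with rfl | rfl <;> simp [pvS]
            rw [hS]
            rw [show pvOutG xs (((n : Nat) : Int), []) (((n : Nat) : Int) :: (pvS 0 (((n : Nat) : Int) + 1) l).1) =
                pvOutG xs (((n : Nat) : Int) + 1,
                  [] ++ [PySem.List.slice xs (some ((n : Nat) : Int)) (some ((n : Nat) : Int)), [PySem.List.pyGetD xs ((n : Nat) : Int) ' ']])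
                  (pvS 0 (((n : Nat) : Int) + 1) l).1 from rfl]
            rw [List.nil_append, pvSlice_nil, hget, pvOutG_append]
            simp
            rw [hcast]
            exact ih (n + 1) 0 hdrop'
          · refine keep d ?_
            rcases hsep with rfl | rfl <;>
              simp [pvS, show ¬ (d = 0) by omega, show ¬ (d < 0) by omega]
        · have h1 : c ≠ '|' := fun h => hsep (Or.inl h)
          have h2 : c ≠ '^' := fun h => hsep (Or.inr h)
          exact keep d (by simp [pvS, hp, hq, h1, h2])

-- the concatenation of A's tokenizer state
def pvJ (r : List (List Char) × List Char) : List Char := r.1.flatten ++ r.2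

theorem pvFlatten_pvFin (r : List (List Char) × List Char) :
    (pvFin r).flatten = pvJ r := by
  by_cases h : r.2 = [] <;> simp [pvFin, pvJ, h]

theorem pvJ_pvPre (p : List Char) (r : List (List Char) × List Char) :
    pvJ (pvPre p r) = p ++ pvJ r := by
  rcases r with ⟨_ | ⟨g, gs⟩, cur⟩ <;> simp [pvPre, pvJ]

theorem pvJ_le (l : List Char) (d : Int) : (pvJ (pvT d l)).length ≤ l.length := by
  induction l generalizing d with
  | nil => simp [pvT, pvJ]
  | cons c l ih =>
    by_cases hsep : c = '|' ∨ c = '^'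
    · have hupd : pvUpd d c = d := by rcases hsep with rfl | rfl <;> simp [pvUpd]
      rcases lt_trichotomy d 0 with hd | rfl | hd
      · have e : pvT d (c :: l) = pvT d l := by
          simp only [pvT, hupd]; simp [hsep, show ¬ (d = 0) by omega, show ¬ (d > 0) by omega]
        rw [e]; have := ih d; simp; omega
      · have e : pvT 0 (c :: l) = ([] :: [c] :: (pvT 0 l).1, (pvT 0 l).2) := by
          simp only [pvT, hupd]; simp [hsep]
        rw [e]; have := ih 0; simp [pvJ] at this ⊢; omega
      · have e : pvT d (c :: l) = pvPre [c] (pvT d l) := by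
          simp only [pvT, hupd]; simp [hsep, show ¬ (d = 0) by omega, hd]
        rw [e, pvJ_pvPre]; have := ih d; simp; omega
    · have h1 : c ≠ '|' := fun h => hsep (Or.inl h)
      have h2 : c ≠ '^' := fun h => hsep (Or.inr h)
      have e : pvT d (c :: l) = pvPre [c] (pvT (pvUpd d c) l) := by
        simp [pvT, h1, h2]
      rw [e, pvJ_pvPre]; have := ih (pvUpd d c); simp; omega

theorem pvJ_lt (l : List Char) (d : Int) (h : ¬ pvNoNeg d l) :
    (pvJ (pvT d l)).length < l.length := by
  induction l generalizing d with
  | nil => exact absurd trivial h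
  | cons c l ih =>
    by_cases hsep : c = '|' ∨ c = '^'
    · have hupd : pvUpd d c = d := by rcases hsep with rfl | rfl <;> simp [pvUpd]
      rcases lt_trichotomy d 0 with hd | rfl | hd
      · have e : pvT d (c :: l) = pvT d l := by
          simp only [pvT, hupd]; simp [hsep, show ¬ (d = 0) by omega, show ¬ (d > 0) by omega]
        rw [e]; have := pvJ_le l d; simp; omega
      · have hnn : ¬ pvNoNeg 0 l := by
          intro h2; exact h ⟨by simp, by rwa [hupd]⟩
        have e : pvT 0 (c :: l) = ([] :: [c] :: (pvT 0 l).1, (pvT 0 l).2) := by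
          simp only [pvT, hupd]; simp [hsep]
        rw [e]; have := ih 0 hnn; simp [pvJ] at this ⊢; omega
      · have hnn : ¬ pvNoNeg d l := by
          intro h2; exact h ⟨fun hc => by omega, by rwa [hupd]⟩
        have e : pvT d (c :: l) = pvPre [c] (pvT d l) := by
          simp only [pvT, hupd]; simp [hsep, show ¬ (d = 0) by omega, hd]
        rw [e, pvJ_pvPre]; have := ih d hnn; simp; omega
    · have h1 : c ≠ '|' := fun h => hsep (Or.inl h)
      have h2 : c ≠ '^' := fun h => hsep (Or.inr h)
      have hnn : ¬ pvNoNeg (pvUpd d c) l := by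
        intro h3; exact h ⟨fun hc => hsep hc.1, h3⟩
      have e : pvT d (c :: l) = pvPre [c] (pvT (pvUpd d c) l) := by
        simp [pvT, h1, h2]
      rw [e, pvJ_pvPre]; have := ih (pvUpd d c) hnn; simp; omega

-- ===== VERDICT (by name: the statements are the Claim_ definitions above) =====
theorem group_courses_spec : Claim_unchanged_group_courses := by
  intro s _ hnd
  unfold group_courses group_courses_alt
  simp only []
  rw [pvA_fold, pvB_fold]
  simp only [pvPre_nil, List.nil_append]
  have hnn : pvNoNeg 0 s.toList := by
    have hf : pvHasNegSep 0 0 s.toList = false := by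
      revert hnd; unfold D_group_courses; cases pvHasNegSep 0 0 s.toList <;> simp
    simpa using pvNoNeg_of_false s.toList 0 0 hf
  have key := pvMain s.toList s.toList 0 0 (by simp) hnn
  simp only [Nat.cast_zero] at key
  rw [show (if (pvT 0 s.toList).2 ≠ [] then (pvT 0 s.toList).1 ++ [(pvT 0 s.toList).2] else (pvT 0 s.toList).1) =
      pvFin (pvT 0 s.toList) from rfl, ← key]
  rfl

theorem group_courses_changed : Claim_changed_group_courses := by
  unfold Claim_changed_group_courses; decide

theorem group_courses_tight : Claim_exact_group_courses := by
  intro s _ hD heq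
  have hnn : ¬ pvNoNeg 0 s.toList := by
    intro h
    have hf : pvHasNegSep 0 0 s.toList = false :=
      pvFalse_of_NoNeg s.toList 0 0 (by simpa using h)
    unfold D_group_courses at hD
    rw [hf] at hD
    exact Bool.false_ne_true hD
  have hA : group_courses s = (pvFin (pvT 0 s.toList)).map (fun g => String.ofList g) := by
    unfold group_courses
    simp only []
    rw [pvA_fold]
    simp only [pvPre_nil, List.nil_append]
    rfl
  have hB : group_courses_alt s =
      (pvOutG s.toList ((0 : Int), []) (pvS 0 0 s.toList).1).map (fun g => String.ofList g) := by
    unfold group_courses_alt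
    simp only []
    rw [pvB_fold]
    simp only [List.nil_append]
    rfl
  rw [hA, hB] at heq
  have heq' : pvFin (pvT 0 s.toList) = pvOutG s.toList ((0 : Int), []) (pvS 0 0 s.toList).1 := by
    have := congrArg (List.map String.toList) heq
    have h2 := congrArg (List.map String.toList) heq
    simpa [List.map_map, Function.comp_def] using h2
  have hlenA : ((pvFin (pvT 0 s.toList)).flatten).length < s.toList.length := by
    rw [pvFlatten_pvFin]
    exact pvJ_lt _ _ hnn
  have hlenB : ((pvOutG s.toList ((0 : Int), []) (pvS 0 0 s.toList).1).flatten).length = s.toList.length := by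
    have := pvJoinB s.toList s.toList 0 0 (by simp)
    simp only [Nat.cast_zero] at this
    rw [this]
  rw [heq', hlenB] at hlenA
  omega
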